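-- pv_equiv track=rewrite | github.com/maskina-is/maskpy | maskpy/parser.py | parse_format_blocks
-- ===== SOURCE A (Python) =====
-- def parse_format_blocks(txt: str) -> dict:
--     """
--     Parses format lines like:
--     format BIL10_1 Multi_BIL10.;
--     Returns a dict: {varname: ("multi", "BIL10")} or {varname: ("single", None)}
--     """
--     types = {}
--     for line in txt.splitlines():
--         if line.strip().startswith("format"):
--             parts = line.strip().split()
--             if len(parts) >= 3:
--                 var = parts[1]
--                 fmt = parts[2].rstrip(".;")
--                 if fmt.startswith("Multi_"):
--                     group = fmt.replace("Multi_", "")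
--                     types[var] = ("multi", group)
--                 else:
--                     types[var] = ("single", None)
--     return types
-- ===== SOURCE B (Python) =====
-- def parse_format_blocks(txt: str) -> dict:
--     """
--     Parses format lines like:
--     format BIL10_1 Multi_BIL10.;
--     Returns a dict: {varname: ("multi", "BIL10")} or {varname: ("single", None)}
--     """
--     # single index-driven scan over the character stream: no splitlines(), no
--     # strip()/split() per line; tokens are cut directly out of txt by position
--     types = {}
--     i, n = 0, len(txt)
--     while i < n:
--         # tokenize one line in place
--         toks = []
--         while i < n and txt[i] not in "\r\n":
--             if txt[i].isspace():
--                 i += 1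
--             else:
--                 j = i
--                 while j < n and not txt[j].isspace():
--                     j += 1
--                 toks.append(txt[i:j])
--                 i = j
--         if len(toks) >= 3 and toks[0].startswith("format"):
--             fmt = toks[2].rstrip(".;")
--             if fmt.startswith("Multi_"):
--                 types[toks[1]] = ("multi", fmt.replace("Multi_", ""))
--             else:
--                 types[toks[1]] = ("single", None)
--         # step over the line terminator ('\r\n' counts as one)
--         if i < n:
--             i += 2 if txt[i] == "\r" and txt[i + 1 : i + 2] == "\n" else 1
--     return types
-- ===== Notes on version B (the rewrite author's own statement) =====
-- stated objective: alternative
-- what changed: B replaces A's splitlines()/strip()/split() line-and-token pipeline by a single index-driven scan over the raw character stream that detects line breaks and cuts tokens out of txt in place, never materialising the line list or stripped strings.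
import Mathlib
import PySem

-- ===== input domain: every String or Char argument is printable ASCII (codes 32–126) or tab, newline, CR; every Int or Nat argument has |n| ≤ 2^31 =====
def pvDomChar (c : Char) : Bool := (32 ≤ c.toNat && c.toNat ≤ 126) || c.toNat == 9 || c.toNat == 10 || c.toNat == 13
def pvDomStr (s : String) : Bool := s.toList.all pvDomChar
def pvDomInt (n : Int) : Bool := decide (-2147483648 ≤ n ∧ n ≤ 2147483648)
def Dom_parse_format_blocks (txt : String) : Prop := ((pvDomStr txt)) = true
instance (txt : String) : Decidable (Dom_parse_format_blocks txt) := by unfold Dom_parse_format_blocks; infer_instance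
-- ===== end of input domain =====

-- B replaces A's splitlines/strip/split line pipeline by a single index-driven scan over the
-- character stream that cuts tokens out of txt in place (alternative decomposition, same cost).

-- hand port of Python's s.rstrip(".;") (PySem has only the two-sided stripChars):
-- drop the maximal trailing run of '.'/';' characters — exact.
def pyRstripDotSemi (s : String) : String :=
  String.ofList ((s.toList.reverse.dropWhile (fun c => c == '.' || c == ';')).reverse)

-- ===== PORT A =====
-- the body of A's `for line in txt.splitlines()` loop
def pfbStepA (types : PySem.Dict String (String × Option String)) (line : String) :
    PySem.Dict String (String × Option String) :=
  if PySem.Str.startswith (PySem.Str.strip line) "format" then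
    let parts := PySem.Str.split₀ (PySem.Str.strip line)
    if 3 ≤ parts.length then
      match PySem.List.pyGet? parts 1, PySem.List.pyGet? parts 2 with
      | some var, some p2 =>
        let fmt := pyRstripDotSemi p2
        if PySem.Str.startswith fmt "Multi_" then
          types.insert var ("multi", some (PySem.Str.replace fmt "Multi_" ""))
        else
          types.insert var ("single", none)
      | _, _ => types  -- unreachable: parts has length ≥ 3
    else types
  else types

def parse_format_blocks (txt : String) : List (String × String × Option String) :=
  ((PySem.Str.splitlines txt).foldl pfbStepA PySem.Dict.empty).items

-- ===== PORT B =====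
-- Source B's inner tokenizing loop: collect the whitespace-separated tokens of the current line
-- (stopping at '\r'/'\n') and return them with the rest of the text from the line terminator on;
-- Source B's index scan `while j < n and not txt[j].isspace()` + slice txt[i:j] is rendered as the
-- structural takeWhile/dropWhile over the same characters.
def pfbLine : List Char → List String × List Char
  | [] => ([], [])
  | c :: r =>
    if c = '\r' ∨ c = '\n' then ([], c :: r)
    else if PySem.Chars.isspace c then pfbLine r
    else
      let tok := String.ofList (c :: r.takeWhile (fun x => !PySem.Chars.isspace x))
      let p := pfbLine (r.dropWhile (fun x => !PySem.Chars.isspace x))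
      (tok :: p.1, p.2)
termination_by l => l.length
decreasing_by
  · simp
  · have := List.length_dropWhile_le (fun x => !PySem.Chars.isspace x) r
    simp; omega

-- Source B's `if len(toks) >= 3 and toks[0].startswith("format"): …` body
def pfbEmit (types : PySem.Dict String (String × Option String)) (toks : List String) :
    PySem.Dict String (String × Option String) :=
  match toks with
  | t0 :: t1 :: t2 :: _ =>
    if PySem.Str.startswith t0 "format" then
      let fmt := pyRstripDotSemi t2
      if PySem.Str.startswith fmt "Multi_" then
        types.insert t1 ("multi", some (PySem.Str.replace fmt "Multi_" ""))
      else
        types.insert t1 ("single", none)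
    else types
  | _ => types

-- Source B's line-terminator step: i += 2 on "\r\n" (txt[i+1:i+2] == "\n"), else i += 1
def pfbSkipBreak (l : List Char) : List Char :=
  match l with
  | [] => []
  | c :: r => if c = '\r' ∧ r.head? = some '\n' then r.tail else r

-- termination facts for the outer while loop (cited by pfbScanGo's decreasing_by)
theorem pfbLine_rest_le (cs : List Char) : (pfbLine cs).2.length ≤ cs.length := by
  induction cs using pfbLine.induct with
  | case1 => simp [pfbLine]
  | case2 c r h => simp [pfbLine, h]
  | case3 c r h1 h2 ih =>
    simp only [pfbLine, if_neg h1, if_pos h2]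
    exact ih.trans (by simp)
  | case4 c r h1 h2 ih =>
    simp only [pfbLine, if_neg h1, if_neg h2]
    exact ih.trans ((List.length_dropWhile_le _ r).trans (by simp))

theorem pfbSkipBreak_le (m : List Char) (hm : m ≠ []) :
    (pfbSkipBreak m).length < m.length := by
  match m with
  | [] => exact absurd rfl hm
  | c :: r =>
    simp only [pfbSkipBreak]
    split_ifs with h
    · have ht : r.tail.length ≤ r.length := by cases r <;> simp
      simp only [List.length_cons]
      omega
    · simp

theorem pfbScan_dec (cs : List Char) (h : cs ≠ []) :
    (pfbSkipBreak ((pfbLine cs).2)).length < cs.length := by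
  cases hr : (pfbLine cs).2 with
  | nil =>
    have : 0 < cs.length := List.length_pos_of_ne_nil h
    simpa [pfbSkipBreak] using this
  | cons x r =>
    have h1 := pfbLine_rest_le cs
    have h2 := pfbSkipBreak_le (x :: r) (by simp)
    rw [hr] at h1
    omega

-- Source B's outer `while i < n` loop
def pfbScanGo (cs : List Char) (types : PySem.Dict String (String × Option String)) :
    PySem.Dict String (String × Option String) :=
  match cs with
  | [] => types
  | c :: r =>
    let p := pfbLine (c :: r)
    pfbScanGo (pfbSkipBreak p.2) (pfbEmit types p.1)
termination_by cs.length
decreasing_by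
  exact pfbScan_dec (c :: r) (by simp)

def parse_format_blocks_alt (txt : String) : List (String × String × Option String) :=
  (pfbScanGo txt.toList PySem.Dict.empty).items

-- ===== PRECONDITION & SPEC =====
def Spec_parse_format_blocks (txt : String) (out : List (String × String × Option String)) : Prop := out = parse_format_blocks_alt txt
instance (txt : String) (out : List (String × String × Option String)) : Decidable (Spec_parse_format_blocks txt out) := by unfold Spec_parse_format_blocks; infer_instance

-- ===== CLAIM (what is proved, stated in full; the proofs are below) =====
def Claim_equal_parse_format_blocks : Prop := ∀ (txt : String), Dom_parse_format_blocks txt → Spec_parse_format_blocks txt (parse_format_blocks txt)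

-- ===== LEMMAS AND PROOFS =====

-- the (variable, type) entry a line contributes, shared characterisation of both loops
def pvEntry? (line : String) : Option (String × (String × Option String)) :=
  match PySem.Str.split₀ line with
  | t0 :: t1 :: t2 :: _ =>
    if PySem.Str.startswith t0 "format" then
      some (t1,
        let fmt := pyRstripDotSemi t2
        if PySem.Str.startswith fmt "Multi_" then
          ("multi", some (PySem.Str.replace fmt "Multi_" ""))
        else ("single", none))
    else none
  | _ => none

-- processing one line of char content, the common normal form of both loops
def pvEmitE (d : PySem.Dict String (String × Option String)) (l : List Char) :
    PySem.Dict String (String × Option String) :=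
  match pvEntry? (String.ofList l) with
  | none => d
  | some p => d.insert p.1 p.2

-- "word" characters: not Python whitespace
def pvP (c : Char) : Bool := !PySem.Chars.isspace c

-- "not a line break" in Source B's sense
def pvNB (c : Char) : Bool := !(c = '\r' || c = '\n')

-- structural specification of str.split()
def pvWords : List Char → List (List Char)
  | [] => []
  | c :: l =>
    if PySem.Chars.isspace c then pvWords l
    else (c :: l.takeWhile pvP) :: pvWords (l.dropWhile pvP)
termination_by l => l.length
decreasing_by
  · simp
  · have := List.length_dropWhile_le pvP l
    simp; omega

theorem pv_go_eq (l : List Char) : ∀ cur acc, PySem.Chars.split₀.go l cur acc =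
    acc.reverse ++ (if cur.isEmpty then pvWords l
      else (cur.reverse ++ l.takeWhile pvP) :: pvWords (l.dropWhile pvP)) := by
  induction l with
  | nil =>
    intro cur acc
    cases cur <;> simp [PySem.Chars.split₀.go, pvWords]
  | cons c rest ih =>
    intro cur acc
    by_cases hc : PySem.Chars.isspace c = true
    · have hp : pvP c = false := by simp [pvP, hc]
      cases cur with
      | nil => simp [PySem.Chars.split₀.go, hc, ih, pvWords]
      | cons x xs => simp [PySem.Chars.split₀.go, hc, ih, pvWords, hp]
    · have hp : pvP c = true := by simp [pvP, hc]
      cases cur with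
      | nil => simp [PySem.Chars.split₀.go, hc, ih, pvWords, hp]
      | cons x xs => simp [PySem.Chars.split₀.go, hc, ih, hp]

theorem pv_split₀_eq_words (l : List Char) : PySem.Chars.split₀ l = pvWords l := by
  simp [PySem.Chars.split₀, pv_go_eq]

theorem pv_words_dropWhile (l : List Char) :
    pvWords (l.dropWhile PySem.Chars.isspace) = pvWords l := by
  induction l with
  | nil => rfl
  | cons c rest ih =>
    by_cases hc : PySem.Chars.isspace c = true
    · simp [List.dropWhile_cons, hc, ih, pvWords]
    · simp [List.dropWhile_cons, hc, pvWords]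

theorem pv_words_all_space (s : List Char) (hs : ∀ c ∈ s, PySem.Chars.isspace c = true) :
    pvWords s = [] := by
  induction s with
  | nil => simp [pvWords]
  | cons c rest ih =>
    have hc := hs c (by simp)
    simp [pvWords, hc, ih (fun c h => hs c (by simp [h]))]

theorem pv_takeWhile_all_space (s : List Char) (hs : ∀ c ∈ s, PySem.Chars.isspace c = true) :
    s.takeWhile pvP = [] := by
  cases s with
  | nil => rfl
  | cons c rest => simp [List.takeWhile_cons, pvP, hs c (by simp)]

theorem pv_words_append_space (l s : List Char)
    (hs : ∀ c ∈ s, PySem.Chars.isspace c = true) : pvWords (l ++ s) = pvWords l := by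
  induction hn : l.length using Nat.strong_induction_on generalizing l with
  | _ n ih =>
    cases l with
    | nil => rw [List.nil_append, pv_words_all_space s hs]; simp [pvWords]
    | cons c rest =>
      by_cases hc : PySem.Chars.isspace c = true
      · simp only [List.cons_append, pvWords, hc, if_pos]
        exact ih rest.length (by simp [← hn]) rest rfl
      · have htake : (rest ++ s).takeWhile pvP = rest.takeWhile pvP := by
          rw [List.takeWhile_append]
          split_ifs with h
          · have hrest : rest.takeWhile pvP = rest :=
              (List.takeWhile_prefix pvP).eq_of_length h
            simp [pv_takeWhile_all_space s hs, hrest]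
          · rfl
        have hdrop : pvWords ((rest ++ s).dropWhile pvP) = pvWords (rest.dropWhile pvP) := by
          rw [List.dropWhile_append]
          split_ifs with h
          · rw [List.isEmpty_iff] at h
            have hds : s.dropWhile pvP = s := by
              cases s with
              | nil => rfl
              | cons a s' => simp [List.dropWhile_cons, pvP, hs a (by simp)]
            rw [h, hds, pv_words_all_space s hs, pvWords]
          · have hlen : (rest.dropWhile pvP).length ≤ rest.length :=
              List.length_dropWhile_le pvP rest
            exact ih (rest.dropWhile pvP).length (by simp [← hn]; omega) _ rfl
        simp [pvWords, List.cons_append, hc, htake, hdrop]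

theorem pv_rstrip_decomp (m : List Char) :
    PySem.Chars.rstrip m ++ (m.reverse.takeWhile PySem.Chars.isspace).reverse = m := by
  simp [PySem.Chars.rstrip, ← List.reverse_append, List.takeWhile_append_dropWhile]

theorem pv_mem_rev_take_space (m : List Char) :
    ∀ c ∈ (m.reverse.takeWhile PySem.Chars.isspace).reverse, PySem.Chars.isspace c = true := by
  intro c hc
  rw [List.mem_reverse] at hc
  exact List.mem_takeWhile_imp hc

theorem pv_words_strip (l : List Char) : pvWords (PySem.Chars.strip l) = pvWords l := by
  have h1 : pvWords (PySem.Chars.rstrip (PySem.Chars.lstrip l))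
      = pvWords (PySem.Chars.lstrip l) := by
    conv_rhs => rw [← pv_rstrip_decomp (PySem.Chars.lstrip l)]
    exact (pv_words_append_space _ _ (pv_mem_rev_take_space _)).symm
  rw [PySem.Chars.strip, h1, PySem.Chars.lstrip, pv_words_dropWhile]

theorem pv_prefix_takeWhile (F : List Char) (hF : ∀ c ∈ F, pvP c = true) (m : List Char) :
    F <+: m ↔ F <+: m.takeWhile pvP := by
  constructor
  · intro h
    induction F generalizing m with
    | nil => simp
    | cons f F' ihF =>
      cases m with
      | nil => simp at h
      | cons b m' =>
        rw [List.cons_prefix_cons] at h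
        obtain ⟨rfl, h'⟩ := h
        have hb : pvP f = true := hF f (by simp)
        rw [List.takeWhile_cons_of_pos hb, List.cons_prefix_cons]
        exact ⟨rfl, ihF (fun c h => hF c (by simp [h])) m' h'⟩
  · intro h
    exact h.trans (List.takeWhile_prefix pvP)

theorem pv_dropWhile_head_false {p : Char → Bool} {l : List Char} {c : Char} {r : List Char}
    (h : l.dropWhile p = c :: r) : p c = false := by
  induction l with
  | nil => simp at h
  | cons a l' ih =>
    by_cases ha : p a = true
    · rw [List.dropWhile_cons_of_pos ha] at h; exact ih h
    · rw [List.dropWhile_cons_of_neg ha] at h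
      cases h; simpa using ha

theorem pv_format_nonspace : ∀ c ∈ "format".toList, pvP c = true := by
  have h : "format".toList = ['f','o','r','m','a','t'] := by rfl
  rw [h]
  intro c hc
  fin_cases hc <;> rfl

theorem pv_start_eq (l t0 : List Char) (rest : List (List Char))
    (h : PySem.Chars.split₀ l = t0 :: rest) :
    PySem.Chars.startswith (PySem.Chars.strip l) "format".toList
      = PySem.Chars.startswith t0 "format".toList := by
  have hF := pv_format_nonspace
  -- the two strings have the same maximal leading word-character run
  have htm : (PySem.Chars.strip l).takeWhile pvP
      = (PySem.Chars.lstrip l).takeWhile pvP := by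
    have hstrip : PySem.Chars.strip l = PySem.Chars.rstrip (PySem.Chars.lstrip l) := rfl
    conv_rhs => rw [← pv_rstrip_decomp (PySem.Chars.lstrip l)]
    rw [hstrip, List.takeWhile_append]
    split_ifs with hlen
    · have heq : (PySem.Chars.rstrip (PySem.Chars.lstrip l)).takeWhile pvP
          = PySem.Chars.rstrip (PySem.Chars.lstrip l) :=
        (List.takeWhile_prefix pvP).eq_of_length hlen
      simp [pv_takeWhile_all_space _ (pv_mem_rev_take_space _), heq]
    · rfl
  -- t0 is that run
  have hwm : pvWords (PySem.Chars.lstrip l) = t0 :: rest := by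
    rw [PySem.Chars.lstrip, pv_words_dropWhile, ← pv_split₀_eq_words]; exact h
  have ht0 : t0 = (PySem.Chars.lstrip l).takeWhile pvP ∧ t0.takeWhile pvP = t0 := by
    cases hm : PySem.Chars.lstrip l with
    | nil => rw [hm] at hwm; simp [pvWords] at hwm
    | cons c r =>
      have hc : PySem.Chars.isspace c = false :=
        pv_dropWhile_head_false (p := PySem.Chars.isspace) (l := l) (by rw [← hm]; rfl)
      have hp : pvP c = true := by simp [pvP, hc]
      rw [hm] at hwm
      have hwm' : (c :: r.takeWhile pvP) :: pvWords (r.dropWhile pvP) = t0 :: rest := by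
        rw [← hwm]; simp [pvWords, hc]
      injection hwm' with h0 h1
      refine ⟨by rw [← h0, List.takeWhile_cons_of_pos hp], ?_⟩
      rw [← h0, List.takeWhile_cons_of_pos hp, List.takeWhile_takeWhile]
      simp
  have hiff : ("format".toList <+: PySem.Chars.strip l) ↔ ("format".toList <+: t0) := by
    rw [pv_prefix_takeWhile _ hF, pv_prefix_takeWhile _ hF t0, htm, ht0.2, ht0.1]
  simp only [PySem.Chars.startswith]
  rw [Bool.eq_iff_iff, List.isPrefixOf_iff_prefix, List.isPrefixOf_iff_prefix]
  exact hiff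

theorem pv_str_split_strip (line : String) :
    PySem.Str.split₀ (PySem.Str.strip line) = PySem.Str.split₀ line := by
  have h : List.map String.toList (PySem.Str.split₀ (PySem.Str.strip line))
      = List.map String.toList (PySem.Str.split₀ line) := by
    rw [PySem.Str.split₀_map_toList, PySem.Str.split₀_map_toList, PySem.Str.toList_strip,
      pv_split₀_eq_words, pv_split₀_eq_words, pv_words_strip]
  exact List.map_injective_iff.mpr (fun _ _ => String.toList_injective) h

theorem pv_start_eq_str (line t0 : String) (rest : List String)
    (h : PySem.Str.split₀ line = t0 :: rest) :
    PySem.Str.startswith (PySem.Str.strip line) "format"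
      = PySem.Str.startswith t0 "format" := by
  have hc : PySem.Chars.split₀ line.toList = t0.toList :: rest.map String.toList := by
    rw [← PySem.Str.split₀_map_toList, h]; rfl
  rw [PySem.Str.startswith_eq, PySem.Str.startswith_eq, PySem.Str.toList_strip]
  exact pv_start_eq line.toList t0.toList _ hc

theorem pv_stepA_eq (d : PySem.Dict String (String × Option String)) (line : String) :
    pfbStepA d line = match pvEntry? line with
      | none => d
      | some p => d.insert p.1 p.2 := by
  unfold pfbStepA pvEntry?
  rw [pv_str_split_strip]
  cases hps : PySem.Str.split₀ line with
  | nil => simp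
  | cons t0 ps1 =>
    cases ps1 with
    | nil => simp
    | cons t1 ps2 =>
      cases ps2 with
      | nil => simp
      | cons t2 ps3 =>
        rw [pv_start_eq_str line t0 _ hps]
        by_cases hs : PySem.Str.startswith t0 "format" = true
        · have hlen : 3 ≤ (t0 :: t1 :: t2 :: ps3).length := by simp
          have h1 : PySem.List.pyGet? (t0 :: t1 :: t2 :: ps3) 1 = some t1 := by
            rw [show (1 : Int) = ((1 : Nat) : Int) from rfl, PySem.List.pyGet?_natCast]
            rfl
          have h2 : PySem.List.pyGet? (t0 :: t1 :: t2 :: ps3) 2 = some t2 := by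
            rw [show (2 : Int) = ((2 : Nat) : Int) from rfl, PySem.List.pyGet?_natCast]
            rfl
          simp only [if_pos hs, if_pos hlen, h1, h2]
          split_ifs <;> rfl
        · simp only [if_neg hs]

-- ===================== B-side lemmas =====================

-- word characters are never line breaks
theorem pv_pvP_pvNB (c : Char) (h : pvP c = true) : pvNB c = true := by
  simp only [pvP, Bool.not_eq_eq_eq_not, Bool.not_true] at h
  simp only [pvNB, Bool.not_eq_eq_eq_not, Bool.not_true, Bool.or_eq_false_iff,
    decide_eq_false_iff_not]
  constructor
  · rintro rfl; exact absurd h (by decide)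
  · rintro rfl; exact absurd h (by decide)

theorem pv_take_take (r : List Char) :
    (r.takeWhile pvNB).takeWhile pvP = r.takeWhile pvP := by
  induction r with
  | nil => rfl
  | cons x t ih =>
    by_cases hx : pvP x = true
    · have hnb := pv_pvP_pvNB x hx
      simp [List.takeWhile_cons, hx, hnb, ih]
    · have hx' : pvP x = false := by simpa using hx
      by_cases hnb : pvNB x = true
      · simp [List.takeWhile_cons, hnb, hx']
      · simp [List.takeWhile_cons, hx', by simpa using hnb]

theorem pv_take_drop (r : List Char) :
    (r.takeWhile pvNB).dropWhile pvP = (r.dropWhile pvP).takeWhile pvNB := by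
  induction r with
  | nil => rfl
  | cons x t ih =>
    by_cases hx : pvP x = true
    · have hnb := pv_pvP_pvNB x hx
      simp [List.takeWhile_cons, List.dropWhile_cons, hx, hnb, ih]
    · have hx' : pvP x = false := by simpa using hx
      by_cases hnb : pvNB x = true
      · simp [List.takeWhile_cons, List.dropWhile_cons, hnb, hx']
      · simp [List.takeWhile_cons, List.dropWhile_cons, hx', by simpa using hnb]

theorem pv_drop_drop (r : List Char) :
    (r.dropWhile pvP).dropWhile pvNB = r.dropWhile pvNB := by
  induction r with
  | nil => rfl
  | cons x t ih =>
    by_cases hx : pvP x = true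
    · have hnb := pv_pvP_pvNB x hx
      simp [List.dropWhile_cons, hx, hnb, ih]
    · have hx' : pvP x = false := by simpa using hx
      simp [List.dropWhile_cons, hx']

-- a break fails pvNB
theorem pv_break_nb (c : Char) : pvNB c = false ↔ (c = '\r' ∨ c = '\n') := by
  simp only [pvNB, Bool.not_eq_eq_eq_not, Bool.not_false, Bool.or_eq_true, decide_eq_true_eq]

-- the tokenizing loop produces exactly the words of the current line
theorem pv_pfbLine_eq (cs : List Char) :
    pfbLine cs = ((pvWords (cs.takeWhile pvNB)).map String.ofList, cs.dropWhile pvNB) := by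
  induction cs using pfbLine.induct with
  | case1 => simp [pfbLine, pvWords]
  | case2 c r h =>
    have hnb : pvNB c = false := (pv_break_nb c).mpr h
    simp [pfbLine, h, List.takeWhile_cons, List.dropWhile_cons, hnb, pvWords]
  | case3 c r h1 h2 ih =>
    have hnb : pvNB c = true := by
      cases h' : pvNB c
      · exact absurd ((pv_break_nb c).mp h') h1
      · rfl
    simp only [pfbLine, if_neg h1, if_pos h2, ih, List.takeWhile_cons_of_pos hnb,
      List.dropWhile_cons_of_pos hnb]
    rw [pvWords, if_pos h2]
  | case4 c r h1 h2 ih =>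
    have hnb : pvNB c = true := by
      cases h' : pvNB c
      · exact absurd ((pv_break_nb c).mp h') h1
      · rfl
    have hP : (fun x => !PySem.Chars.isspace x) = pvP := by funext x; rfl
    have h2' : PySem.Chars.isspace c = false := by simpa using h2
    simp only [pfbLine, if_neg h1, if_neg h2, hP] at ih ⊢
    rw [ih]
    simp only [List.takeWhile_cons_of_pos hnb, List.dropWhile_cons_of_pos hnb]
    rw [pvWords, if_neg (by simp [h2'])]
    simp [pv_take_take, pv_take_drop, pv_drop_drop]

-- Str.split₀ of a packed line, as a list of packed words
theorem pv_split₀_ofList (l : List Char) :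
    PySem.Str.split₀ (String.ofList l) = (pvWords l).map String.ofList := by
  apply List.map_injective_iff.mpr (fun _ _ => String.toList_injective)
  rw [PySem.Str.split₀_map_toList, String.toList_ofList, pv_split₀_eq_words, List.map_map]
  have : (String.toList ∘ String.ofList) = (id : List Char → List Char) := by
    funext x; simp
  rw [this, List.map_id]

-- emitting the tokens of a line is processing the line
theorem pv_pfbEmit_eq (d : PySem.Dict String (String × Option String)) (l : List Char) :
    pfbEmit d ((pvWords l).map String.ofList) = pvEmitE d l := by
  unfold pfbEmit pvEmitE pvEntry?
  rw [pv_split₀_ofList]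
  cases pvWords l with
  | nil => simp
  | cons t0 w1 =>
    cases w1 with
    | nil => simp
    | cons t1 w2 =>
      cases w2 with
      | nil => simp
      | cons t2 w3 =>
        dsimp only [List.map]
        split_ifs <;> rfl

-- under Dom, PySem's splitlines line-break test is exactly "is '\r' or '\n'"
theorem pv_isB_dom (c : Char) (h : pvDomChar c = true) :
    ((fun c => (have n := c.toNat;
      decide (n = 10) || decide (n = 13) || decide (n = 11) || decide (n = 12) ||
      decide (n = 28) || decide (n = 29) || decide (n = 30) || decide (n = 133) ||
      decide (n = 8232) || decide (n = 8233))) c) = !pvNB c := by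
  simp only [pvDomChar, Bool.or_eq_true, Bool.and_eq_true, decide_eq_true_eq, beq_iff_eq] at h
  by_cases h10 : c.toNat = 10
  · have : c = '\n' := by rw [← Char.ofNat_toNat c, h10]
    subst this; decide
  · by_cases h13 : c.toNat = 13
    · have : c = '\r' := by rw [← Char.ofNat_toNat c, h13]
      subst this; decide
    · have hn : c ≠ '\n' := fun he => h10 (by rw [he]; rfl)
      have hr : c ≠ '\r' := fun he => h13 (by rw [he]; rfl)
      have hnb : pvNB c = true := by simp [pvNB, hr, hn]
      rw [hnb]
      simp only [Bool.not_true]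
      simp only [Bool.or_eq_false_iff, decide_eq_false_iff_not]
      omega

-- the lines of a Dom text, as Source B carves them out
def pvLinesF (cs : List Char) : List (List Char) :=
  match cs with
  | [] => []
  | c :: r =>
    (c :: r).takeWhile pvNB :: pvLinesF (pfbSkipBreak ((c :: r).dropWhile pvNB))
termination_by cs.length
decreasing_by
  cases hr : (c :: r).dropWhile pvNB with
  | nil => simp [pfbSkipBreak]
  | cons x t =>
    have h1 : ((c :: r).dropWhile pvNB).length ≤ (c :: r).length :=
      List.length_dropWhile_le pvNB (c :: r)
    have h2 := pfbSkipBreak_le (x :: t) (by simp)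
    rw [hr] at h1
    omega

-- go on a list whose head is not the two-character "\r\n" pattern
theorem pv_go_break (isB : Char → Bool) (c : Char) (r cur : List Char)
    (acc : List (List Char)) (h1 : ¬ (c = '\r' ∧ ∃ r', r = '\n' :: r')) :
    PySem.Chars.splitlines.go isB (c :: r) cur acc =
      if isB c = true then PySem.Chars.splitlines.go isB r [] (cur.reverse :: acc)
      else PySem.Chars.splitlines.go isB r (c :: cur) acc := by
  rw [PySem.Chars.splitlines.go.eq_def]
  split
  · rename_i heq; simp at heq
  · rename_i heq
    injection heq with ha hb
    exact absurd ⟨ha ▸ rfl, _, hb⟩ h1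
  · rename_i c' rest' heq
    injection heq with ha hb
    subst ha; subst hb; rfl

-- the tail of F [] cs is pvLinesF cs
theorem pv_linesF_tail (cs : List Char) :
    (if cs.isEmpty then ([] : List (List Char))
     else cs.takeWhile pvNB :: pvLinesF (pfbSkipBreak (cs.dropWhile pvNB))) = pvLinesF cs := by
  cases cs with
  | nil => simp [pvLinesF]
  | cons c r => rw [pvLinesF]; simp

theorem pv_sl_go (isB : Char → Bool) (cs : List Char)
    (h : ∀ c ∈ cs, isB c = !pvNB c) : ∀ (cur : List Char) (acc : List (List Char)),
    PySem.Chars.splitlines.go isB cs cur acc = acc.reverse ++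
      (if cs.isEmpty then (if cur.isEmpty then [] else [cur.reverse])
       else (cur.reverse ++ cs.takeWhile pvNB) ::
         pvLinesF (pfbSkipBreak (cs.dropWhile pvNB))) := by
  induction hn : cs.length using Nat.strong_induction_on generalizing cs with
  | _ n ih =>
    intro cur acc
    match cs with
    | [] =>
      cases cur <;> simp [PySem.Chars.splitlines.go]
    | c :: rest =>
      have hrest : ∀ x ∈ rest, isB x = !pvNB x := fun x hx => h x (by simp [hx])
      by_cases hrn : c = '\r' ∧ ∃ r', rest = '\n' :: r'
      · obtain ⟨rfl, r', rfl⟩ := hrn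
        have hr' : ∀ x ∈ r', isB x = !pvNB x := fun x hx => hrest x (by simp [hx])
        rw [show PySem.Chars.splitlines.go isB ('\r' :: '\n' :: r') cur acc
              = PySem.Chars.splitlines.go isB r' [] (cur.reverse :: acc) from rfl]
        rw [ih r'.length (by simp [← hn]) r' hr' rfl [] (cur.reverse :: acc)]
        have harg : (if r'.isEmpty then
              (if (List.isEmpty ([] : List Char)) then ([] : List (List Char))
               else [([] : List Char).reverse])
             else (([] : List Char).reverse ++ r'.takeWhile pvNB) ::
               pvLinesF (pfbSkipBreak (r'.dropWhile pvNB))) = pvLinesF r' := by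
          cases r' with
          | nil => simp [pvLinesF]
          | cons x t => rw [pvLinesF]; simp
        rw [harg]
        have hnb : pvNB '\r' = false := by decide
        rw [List.takeWhile_cons_of_neg (by simp [hnb]), List.dropWhile_cons_of_neg (by simp [hnb])]
        rw [show pfbSkipBreak ('\r' :: '\n' :: r') = r' from by simp [pfbSkipBreak]]
        simp
      · rw [pv_go_break isB c rest cur acc hrn]
        have hc := h c (by simp)
        by_cases hnb : pvNB c = true
        · have hB : isB c = false := by rw [hc, hnb]; rfl
          rw [if_neg (by simp [hB])]
          rw [ih rest.length (by simp [← hn]) rest hrest rfl (c :: cur) acc]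
          rw [List.takeWhile_cons_of_pos hnb, List.dropWhile_cons_of_pos hnb]
          cases rest with
          | nil => simp [pfbSkipBreak, pvLinesF]
          | cons x t => simp
        · have hnb' : pvNB c = false := by simpa using hnb
          have hB : isB c = true := by rw [hc, hnb']; rfl
          rw [if_pos hB]
          rw [ih rest.length (by simp [← hn]) rest hrest rfl [] (cur.reverse :: acc)]
          have hskip : pfbSkipBreak (c :: rest) = rest := by
            simp only [pfbSkipBreak]
            rw [if_neg]
            intro ⟨hcr, hhd⟩
            rcases rest with _ | ⟨d, t⟩
            · simp at hhd
            · simp at hhd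
              exact hrn ⟨hcr, t, by rw [hhd]⟩
          rw [List.takeWhile_cons_of_neg (by simp [hnb']),
            List.dropWhile_cons_of_neg (by simp [hnb']), hskip]
          simp only [List.isEmpty_nil, List.reverse_nil, List.nil_append, if_true]
          rw [pv_linesF_tail]
          simp

theorem pv_splitlines_dom (cs : List Char) (h : ∀ c ∈ cs, pvDomChar c = true) :
    PySem.Chars.splitlines cs = pvLinesF cs := by
  unfold PySem.Chars.splitlines
  rw [pv_sl_go _ cs (fun c hc => pv_isB_dom c (h c hc)) [] []]
  simpa using pv_linesF_tail cs

-- the outer scan equals folding the line processor over Source B's lines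
theorem pv_pfbScanGo_eq (cs : List Char) (d : PySem.Dict String (String × Option String)) :
    pfbScanGo cs d = (pvLinesF cs).foldl pvEmitE d := by
  induction hn : cs.length using Nat.strong_induction_on generalizing cs d with
  | _ n ih =>
    match cs with
    | [] => rw [pfbScanGo, pvLinesF]; rfl
    | c :: rest =>
      rw [pfbScanGo, pvLinesF]
      simp only [pv_pfbLine_eq, List.foldl_cons, pv_pfbEmit_eq]
      have hlt : (pfbSkipBreak ((c :: rest).dropWhile pvNB)).length < (c :: rest).length := by
        cases hr : (c :: rest).dropWhile pvNB with
        | nil =>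
          simp [pfbSkipBreak]
        | cons x r =>
          have h1 : ((c :: rest).dropWhile pvNB).length ≤ (c :: rest).length :=
            List.length_dropWhile_le pvNB (c :: rest)
          have h2 := pfbSkipBreak_le (x :: r) (by simp)
          rw [hr] at h1
          omega
      exact ih _ (by omega) _ _ rfl

-- ===== VERDICT (by name: the statement is the Claim_ definition above) =====
theorem parse_format_blocks_spec : Claim_equal_parse_format_blocks := by
  intro txt hdom
  unfold Spec_parse_format_blocks parse_format_blocks parse_format_blocks_alt
  have hchars : ∀ c ∈ txt.toList, pvDomChar c = true := by
    unfold Dom_parse_format_blocks pvDomStr at hdom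
    exact fun c hc => List.all_eq_true.mp hdom c hc
  have hfun : (fun (d : PySem.Dict String (String × Option String)) (l : List Char) =>
      pfbStepA d (String.ofList l)) = pvEmitE := by
    funext d l
    rw [pv_stepA_eq]
    rfl
  rw [PySem.Str.splitlines, List.foldl_map, hfun, pv_pfbScanGo_eq,
    pv_splitlines_dom _ hchars]
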